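-- pv_equiv track=rewrite | github.com/LeanderKafemann/ccs-pycalendar | src/pycalendar/utils.py | decodeParameterValue
-- ===== SOURCE A (Python) =====
-- from typing import Any, List, Tuple, IO, Sequence, Union
--
-- def decodeParameterValue(value: str) -> str:
--     if value is not None and "^" in value:
--         decoded: List[str] = []
--         last = ''
--         for c in value:
--             if last == '^':
--                 if c == 'n':
--                     decoded.append('\n')
--                 elif c == '\'':
--                     decoded.append('"')
--                 elif c == '^':
--                     decoded.append('^')
--                     c = ''
--                 else:
--                     decoded.append('^')
--                     decoded.append(c)
--             elif c != '^':
--                 decoded.append(c)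
--             last = c
--         if last == '^':
--             decoded.append('^')
--         return "".join(decoded)
--     else:
--         return value
-- ===== SOURCE B (Python) =====
-- def decodeParameterValue(value: str) -> str:
--     if value is None or "^" not in value:
--         return value
--     out = []
--     i = 0
--     n = len(value)
--     while i < n:
--         c = value[i]
--         if c == '^' and i + 1 < n:
--             nxt = value[i + 1]
--             if nxt == 'n':
--                 out.append('\n')
--             elif nxt == '\'':
--                 out.append('"')
--             elif nxt == '^':
--                 out.append('^')
--             else:
--                 out.append('^')
--                 out.append(nxt)
--             i += 2
--         elif c == '^':
--             out.append('^')
--             i += 1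
--         else:
--             out.append(c)
--             i += 1
--     return "".join(out)
-- ===== Notes on version B (the rewrite author's own statement) =====
-- stated objective: alternative
-- what changed: Replaced the one-character-lookbehind state machine (carrying 'last' across iterations plus a fix-up step after the loop) with a stateless index scan that looks ahead and consumes escape pairs in one step.
import Mathlib
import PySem

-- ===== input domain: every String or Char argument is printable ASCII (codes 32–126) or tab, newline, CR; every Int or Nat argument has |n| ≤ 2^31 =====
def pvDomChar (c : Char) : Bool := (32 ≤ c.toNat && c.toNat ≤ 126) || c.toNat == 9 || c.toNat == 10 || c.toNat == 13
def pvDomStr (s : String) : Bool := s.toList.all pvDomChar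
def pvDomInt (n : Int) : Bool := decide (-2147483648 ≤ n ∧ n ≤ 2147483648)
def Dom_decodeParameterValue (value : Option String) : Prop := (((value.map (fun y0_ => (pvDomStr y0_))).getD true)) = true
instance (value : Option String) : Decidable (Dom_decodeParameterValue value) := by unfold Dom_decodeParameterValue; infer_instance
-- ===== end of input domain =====

-- ===== PORT A =====
-- B replaces A's lookbehind state machine by a pair-consuming lookahead scan; same results, similar cost.
-- step of A's `for c in value` loop; Python's `last`/`c` strings '' are modelled by `none`
def pvStep (s : List Char × Option Char) (c : Char) : List Char × Option Char :=
  match s with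
  | (decoded, last) =>
    if last = some '^' then
      if c = 'n' then (decoded ++ ['\n'], some c)
      else if c = '\'' then (decoded ++ ['"'], some c)
      else if c = '^' then (decoded ++ ['^'], none)      -- c = '' afterwards
      else (decoded ++ ['^', c], some c)
    else if c ≠ '^' then (decoded ++ [c], some c)
    else (decoded, some c)

-- A's trailing `if last == '^': decoded.append('^')`
def pvFin (s : List Char × Option Char) : List Char :=
  if s.2 = some '^' then s.1 ++ ['^'] else s.1

def decodeParameterValue (value : Option String) : Option String :=
  match value with
  | none => none
  | some v =>
    if v.toList.contains '^' then
      some (String.mk (pvFin (v.toList.foldl pvStep ([], none))))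
    else some v

-- ===== PORT B =====
-- B's while-loop with index lookahead, as structural recursion on the character list
def pvScan : List Char → List Char
  | [] => []
  | [c] => if c = '^' then ['^'] else [c]
  | c :: n :: rest =>
    if c = '^' then
      (if n = 'n' then ['\n']
       else if n = '\'' then ['"']
       else if n = '^' then ['^']
       else ['^', n]) ++ pvScan rest
    else c :: pvScan (n :: rest)

def decodeParameterValue_alt (value : Option String) : Option String :=
  match value with
  | none => none
  | some v =>
    if v.toList.contains '^' then some (String.mk (pvScan v.toList))
    else some v

-- ===== PRECONDITION & SPEC =====
def Spec_decodeParameterValue (value : Option String) (out : Option String) : Prop := out = decodeParameterValue_alt value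
instance (value : Option String) (out : Option String) : Decidable (Spec_decodeParameterValue value out) := by unfold Spec_decodeParameterValue; infer_instance

-- ===== CLAIM (what is proved, stated in full; the proofs are below) =====
def Claim_equal_decodeParameterValue : Prop := ∀ (value : Option String), Dom_decodeParameterValue value → Spec_decodeParameterValue value (decodeParameterValue value)

-- ===== LEMMAS AND PROOFS =====
-- invariant: from any non-caret `last`, the finalized fold equals acc ++ pvScan l;
-- and from last = '^', it equals acc ++ pvScan ('^' :: l)
theorem pv_fold_eq (l : List Char) :
    (∀ acc last, last ≠ some '^' →
        pvFin (List.foldl pvStep (acc, last) l) = acc ++ pvScan l) ∧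
    (∀ acc, pvFin (List.foldl pvStep (acc, some '^') l) = acc ++ pvScan ('^' :: l)) := by
  induction l with
  | nil =>
    refine ⟨fun acc last h => ?_, fun acc => ?_⟩
    · simp [pvFin, pvScan, h]
    · simp [pvFin, pvScan]
  | cons c l ih =>
    refine ⟨fun acc last h => ?_, fun acc => ?_⟩
    · by_cases hc : c = '^'
      · subst hc
        simpa [pvStep, h] using ih.2 acc
      · have hstep : List.foldl pvStep (acc, last) (c :: l)
            = List.foldl pvStep (acc ++ [c], some c) l := by
          simp [pvStep, h, hc]
        rw [hstep, ih.1 (acc ++ [c]) (some c) (by simp [hc])]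
        cases l with
        | nil => simp [pvScan, hc]
        | cons n rest => simp [pvScan, hc]
    · by_cases hn : c = 'n'
      · subst hn
        have := ih.1 (acc ++ ['\n']) (some 'n') (by decide)
        simp [pvStep, pvScan, this]
      · by_cases hq : c = '\''
        · subst hq
          have := ih.1 (acc ++ ['"']) (some '\'') (by decide)
          simp [pvStep, pvScan, hn, this]
        · by_cases hc : c = '^'
          · subst hc
            have := ih.1 (acc ++ ['^']) none (by simp)
            simp [pvStep, pvScan, this]
          · have := ih.1 (acc ++ ['^', c]) (some c) (by simp [hc])
            simp [pvStep, pvScan, hn, hq, hc, this]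

-- ===== VERDICT (by name: the statement is the Claim_ definition above) =====
theorem decodeParameterValue_spec : Claim_equal_decodeParameterValue := by
  intro value _
  unfold Spec_decodeParameterValue decodeParameterValue decodeParameterValue_alt
  cases value with
  | none => rfl
  | some v =>
    by_cases h : '^' ∈ v.toList
    · simp [h, (pv_fold_eq v.toList).1 [] none (by simp)]
    · simp [h]
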